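-- pv_equiv track=rewrite | github.com/louischatriot/small-katas | light_switch.py | dfs
-- ===== SOURCE A (Python) =====
-- def check_i(switches_a, i, pos):
--     for j in range(0, len(pos)):
--         res = 0
--         if switches_a[i][j] == 1:
--             if pos[j] == 2:
--                 return None   # Can't tell yet
--             else:
--                 res += pos[j]
--
--     return res % 2 == 1
--
-- def propagate(switches_a, pos, idx):
--     n = len(switches_a)
--     m = len(pos)
--
--     for i in range(0, n):
--         # Switch we are testing has impact on this light
--         if switches_a[i][idx] == 1:
--             if check_i(switches_a, i, pos) is False:
--                 return False
--
--     return pos   # No true propagation for now, future optimization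
--
-- def dfs(switches_a, pos, idx = 0):
--     n = len(switches_a)
--     m = len(pos)
--
--
--     if idx == m - 1:
--         return propagate(switches_a, pos, m - 1) is not False
--
--     if pos[idx] != 2:
--         return dfs(switches_a, pos, idx + 1)
--
--     for p in [0, 1]:
--         # Can be optimized to avoid copying twice
--         _pos = [d for d in pos]
--         _pos[idx] = p
--
--         _pos = propagate(switches_a, _pos, idx)
--         if _pos:
--             if dfs(switches_a, _pos, idx + 1):
--                 return True
--
--     return False
-- ===== SOURCE B (Python) =====
-- # Same search as an explicit iterative depth-first search over a stack of
-- # (position-list, index) frames instead of recursion.  check_i and propagate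
-- # are kept exactly as in the original module.
--
-- def check_i(switches_a, i, pos):
--     for j in range(0, len(pos)):
--         res = 0
--         if switches_a[i][j] == 1:
--             if pos[j] == 2:
--                 return None   # Can't tell yet
--             else:
--                 res += pos[j]
--
--     return res % 2 == 1
--
-- def propagate(switches_a, pos, idx):
--     n = len(switches_a)
--     m = len(pos)
--
--     for i in range(0, n):
--         # Switch we are testing has impact on this light
--         if switches_a[i][idx] == 1:
--             if check_i(switches_a, i, pos) is False:
--                 return False
--
--     return pos   # No true propagation for now, future optimization
--
-- def dfs(switches_a, pos, idx=0):
--     m = len(pos)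
--     stack = [(pos, idx)]
--     while stack:
--         cur, i = stack.pop()
--         if i == m - 1:
--             if propagate(switches_a, cur, m - 1) is not False:
--                 return True
--             continue
--         if cur[i] != 2:
--             stack.append((cur, i + 1))
--             continue
--         for p in (1, 0):  # pushed reversed, so p = 0 is explored first
--             _pos = list(cur)
--             _pos[i] = p
--             _pos = propagate(switches_a, _pos, i)
--             if _pos:
--                 stack.append((_pos, i + 1))
--     return False
-- ===== Notes on version B (the rewrite author's own statement) =====
-- stated objective: alternative
-- what changed: dfs's recursive backtracking search is replaced by an explicit iterative depth-first search over a stack of (position, index) frames (p=1 pushed before p=0 so p=0 is explored first); check_i and propagate are kept verbatim.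
-- outside the precondition, e.g. on dfs([[1, 1], [0]], [1, 0], 0): A returns False, B returns False
import Mathlib
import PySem

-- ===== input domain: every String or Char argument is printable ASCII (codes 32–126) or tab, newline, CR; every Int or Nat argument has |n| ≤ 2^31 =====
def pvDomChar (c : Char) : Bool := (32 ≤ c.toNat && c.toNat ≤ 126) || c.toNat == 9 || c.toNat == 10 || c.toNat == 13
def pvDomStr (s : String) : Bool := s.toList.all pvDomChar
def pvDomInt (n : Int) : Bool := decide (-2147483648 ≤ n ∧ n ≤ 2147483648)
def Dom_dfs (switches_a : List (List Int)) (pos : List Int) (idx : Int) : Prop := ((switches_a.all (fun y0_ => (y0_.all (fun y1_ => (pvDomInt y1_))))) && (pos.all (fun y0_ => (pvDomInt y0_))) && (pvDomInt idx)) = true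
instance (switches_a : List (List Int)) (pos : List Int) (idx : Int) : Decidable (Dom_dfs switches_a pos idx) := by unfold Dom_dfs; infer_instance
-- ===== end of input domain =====

-- B replaces dfs's recursion by an explicit iterative stack-driven depth-first search
-- (same branching, copying, propagation and early-success order); check_i and propagate
-- are the same helpers in both Python versions, so they are shared below.
-- Both loops are ported with a fuel parameter that strictly exceeds the number of steps
-- the loop can take (a totality device only; the Python loops terminate on these inputs).

-- ===== PORT A =====
-- check_i's 'for j in range(0, len(pos))' loop; res is re-zeroed every iteration,
-- exactly as in the Python.  Returns none for Python's None.
def pvCheckLoop (row : List Int) (pos : List Int) : List Int → Int → Option Int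
  | [], res => some res
  | j :: js, res =>
    let res := 0
    if PySem.List.pyGetD row j 0 = 1 then
      if PySem.List.pyGetD pos j 0 = 2 then none
      else pvCheckLoop row pos js (res + PySem.List.pyGetD pos j 0)
    else pvCheckLoop row pos js res

def pvCheckI (row : List Int) (pos : List Int) : Option Bool :=
  (pvCheckLoop row pos (PySem.List.pyRange 0 (pos.length : Int) 1) 0).map
    (fun res => decide (PySem.Int.mod res 2 = 1))

-- propagate's 'for i in range(0, n)' loop, iterating the rows in order.
def pvPropLoop (rows : List (List Int)) (pos : List Int) (idx : Int) : Bool :=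
  match rows with
  | [] => true
  | row :: rest =>
      if PySem.List.pyGetD row idx 0 = 1 then
        if pvCheckI row pos = some false then false
        else pvPropLoop rest pos idx
      else pvPropLoop rest pos idx

-- propagate: none = Python's False, some pos = the returned list.
def pvPropagate (switches_a : List (List Int)) (pos : List Int) (idx : Int) : Option (List Int) :=
  if pvPropLoop switches_a pos idx then some pos else none

-- dfs, fuelled: one unit of fuel per recursion level; the wrapper dfs below supplies
-- more fuel than the recursion depth, so the 0 case is never reached on any input.
def dfsGo (switches_a : List (List Int)) (pos : List Int) (idx : Int) : Nat → Bool
  | 0 => false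
  | fuel + 1 =>
    let m : Int := (pos.length : Int)
    if idx = m - 1 then (pvPropagate switches_a pos (m - 1)).isSome
    else
      match PySem.List.pyGet? pos idx with
      | none => false          -- Python raises IndexError on pos[idx] (outside Pre_)
      | some v =>
        if v ≠ 2 then dfsGo switches_a pos (idx + 1) fuel
        else
          -- the 'for p in [0, 1]' loop, unrolled: copy pos, set index idx to p,
          -- propagate; 'if _pos:' is 'not False and nonempty'; 'return True' on
          -- the first success is the boolean or.
          (match pvPropagate switches_a (PySem.List.pySetD pos idx 0) idx with
           | some q => decide (q ≠ []) && dfsGo switches_a q (idx + 1) fuel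
           | none => false) ||
          (match pvPropagate switches_a (PySem.List.pySetD pos idx 1) idx with
           | some q => decide (q ≠ []) && dfsGo switches_a q (idx + 1) fuel
           | none => false)

def dfs (switches_a : List (List Int)) (pos : List Int) (idx : Int) : Bool :=
  dfsGo switches_a pos idx (((pos.length : Int) - idx).toNat + 1)

-- ===== PORT B =====
-- Frame weight: bounds the number of loop steps a frame can still cause (fuel bound).
def pvW (m i : Int) : Nat := 3 ^ ((m - 1 - i).toNat)

def pvWsum (m : Int) (st : List (List Int × Int)) : Nat :=
  (st.map (fun f => pvW m f.2)).sum

-- Frames pushed for one value p: copy cur, set index i to p, propagate; push iff truthy.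
def pvPushFrame (switches_a : List (List Int)) (cur : List Int) (i p : Int) : List (List Int × Int) :=
  match pvPropagate switches_a (PySem.List.pySetD cur i p) i with
  | some q => if q ≠ [] then [(q, i + 1)] else []
  | none => []

-- The explicit DFS: pop a frame, test/branch exactly as the Python while loop does;
-- fuel counts loop iterations (the wrapper supplies enough for every input).
def pvStackGo (switches_a : List (List Int)) (m : Int) : Nat → List (List Int × Int) → Bool
  | _, [] => false
  | 0, _ :: _ => false     -- fuel exhausted; never reached with the wrapper's fuel
  | fuel + 1, (cur, i) :: rest =>
    if i = m - 1 then
      if (pvPropagate switches_a cur (m - 1)).isSome then true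
      else pvStackGo switches_a m fuel rest
    else
      match PySem.List.pyGet? cur i with
      | none => false        -- Python raises IndexError on cur[i] (outside Pre_)
      | some v =>
        if v ≠ 2 then pvStackGo switches_a m fuel ((cur, i + 1) :: rest)
        else pvStackGo switches_a m fuel
               (pvPushFrame switches_a cur i 0 ++ (pvPushFrame switches_a cur i 1 ++ rest))

def dfs_alt (switches_a : List (List Int)) (pos : List Int) (idx : Int) : Bool :=
  let m : Int := (pos.length : Int)
  pvStackGo switches_a m (pvWsum m [(pos, idx)]) [(pos, idx)]

-- ===== PRECONDITION & SPEC =====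
-- Pre_ excludes exactly the inputs where A raises: idx out of pos's index range
-- (IndexError, or NameError via an empty pos), and rows shorter than pos, whose
-- indexing by check_i/propagate can raise IndexError (a few such ragged inputs
-- return early before touching the short row; they are excluded with the rest).
def Pre_dfs (switches_a : List (List Int)) (pos : List Int) (idx : Int) : Prop :=
  PySem.Raise.InRange pos.length idx ∧ ∀ row ∈ switches_a, pos.length ≤ row.length
instance (switches_a : List (List Int)) (pos : List Int) (idx : Int) : Decidable (Pre_dfs switches_a pos idx) := by unfold Pre_dfs; infer_instance

def pvWitness_dfs : List (List Int) × List Int × Int := ([[1, 1], [0, 1]], [2, 2], 0)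

def Spec_dfs (switches_a : List (List Int)) (pos : List Int) (idx : Int) (out : Bool) : Prop := out = dfs_alt switches_a pos idx
instance (switches_a : List (List Int)) (pos : List Int) (idx : Int) (out : Bool) : Decidable (Spec_dfs switches_a pos idx out) := by unfold Spec_dfs; infer_instance

-- ===== CLAIM (what is proved, stated in full; the proofs are below) =====
def Claim_equal_dfs : Prop := ∀ (switches_a : List (List Int)) (pos : List Int) (idx : Int), Dom_dfs switches_a pos idx → Pre_dfs switches_a pos idx → Spec_dfs switches_a pos idx (dfs switches_a pos idx)

-- ===== LEMMAS AND PROOFS =====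

theorem pvPropagate_eq_some {switches_a : List (List Int)} {pos q : List Int} {idx : Int}
    (h : pvPropagate switches_a pos idx = some q) : q = pos := by
  unfold pvPropagate at h
  split at h <;> simp_all

theorem pvInRange_of_get {xs : List Int} {i : Int} {v : Int}
    (hv : PySem.List.pyGet? xs i = some v) : PySem.Raise.InRange xs.length i := by
  by_contra hc
  rw [(PySem.List.pyGet?_eq_none_iff xs i).2 hc] at hv
  simp at hv

theorem pvW_pos (m i : Int) : 0 < pvW m i := Nat.pow_pos (by norm_num)

theorem pvW_succ_lt {m i : Int} (h : i < m - 1) : pvW m (i + 1) < pvW m i := by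
  unfold pvW
  exact Nat.pow_lt_pow_right (by norm_num) (by omega)

theorem pvW_triple {m i : Int} (h : i < m - 1) : pvW m i = 3 * pvW m (i + 1) := by
  have hk : (m - 1 - i).toNat = (m - 1 - (i + 1)).toNat + 1 := by omega
  unfold pvW
  rw [hk, pow_succ]
  ring

theorem pvWsum_cons (m : Int) (cur : List Int) (i : Int) (rest : List (List Int × Int)) :
    pvWsum m ((cur, i) :: rest) = pvW m i + pvWsum m rest := by
  simp [pvWsum]

theorem pvWsum_append (m : Int) (s t : List (List Int × Int)) :
    pvWsum m (s ++ t) = pvWsum m s + pvWsum m t := by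
  unfold pvWsum
  simp

theorem pvPushFrame_wsum_le (switches_a : List (List Int)) (cur : List Int) (i p m : Int) :
    pvWsum m (pvPushFrame switches_a cur i p) ≤ pvW m (i + 1) := by
  unfold pvPushFrame pvWsum
  split
  · split <;> simp
  · simp

-- frame/stack well-formedness: every frame's list has length m and its index is in range
def pvGoodF (m : Int) (f : List Int × Int) : Prop :=
  (f.1.length : Int) = m ∧ -m ≤ f.2 ∧ f.2 ≤ m - 1

def pvGoodSt (m : Int) (st : List (List Int × Int)) : Prop := ∀ f ∈ st, pvGoodF m f

theorem pvPushFrame_good {switches_a : List (List Int)} {cur : List Int} {i : Int} (p m : Int)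
    (hlen : (cur.length : Int) = m) (hlb : -m ≤ i) (h : i < m - 1) :
    pvGoodSt m (pvPushFrame switches_a cur i p) := by
  intro f hf
  unfold pvPushFrame at hf
  split at hf
  next q hp =>
    obtain rfl := pvPropagate_eq_some hp
    split at hf
    next hq =>
      simp only [List.mem_singleton] at hf
      subst hf
      refine ⟨?_, by omega, by omega⟩
      have hl := PySem.List.length_pySetD cur i p
      simp only [hl]
      exact hlen
    next => simp at hf
  next => simp at hf

-- the fuelled dfs loop computes the same value under any sufficient fuel
theorem pvDfsGo_congr (switches_a : List (List Int)) :
    ∀ (f1 : Nat) (pos : List Int) (idx : Int) (f2 : Nat),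
      ((pos.length : Int) - idx).toNat < f1 → ((pos.length : Int) - idx).toNat < f2 →
      dfsGo switches_a pos idx f1 = dfsGo switches_a pos idx f2 := by
  intro f1
  induction f1 with
  | zero => intro pos idx f2 h1 h2; omega
  | succ f1 IH =>
    intro pos idx f2 h1 h2
    cases f2 with
    | zero => omega
    | succ f2 =>
      simp only [dfsGo]
      by_cases him : idx = (pos.length : Int) - 1
      · simp [him]
      · simp only [if_neg him]
        cases hv : PySem.List.pyGet? pos idx with
        | none => rfl
        | some v =>
          obtain ⟨hl1, hl2⟩ := pvInRange_of_get hv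
          by_cases hv2 : v = 2
          · simp only [hv2, ne_eq, not_true_eq_false, if_false]
            have hg0 := PySem.List.length_pySetD pos idx (0 : Int)
            have hg1 := PySem.List.length_pySetD pos idx (1 : Int)
            cases hp0 : pvPropagate switches_a (PySem.List.pySetD pos idx 0) idx with
            | none =>
              cases hp1 : pvPropagate switches_a (PySem.List.pySetD pos idx 1) idx with
              | none => rfl
              | some q1 =>
                obtain rfl := pvPropagate_eq_some hp1
                simp only
                rw [IH _ (idx + 1) f2 (by omega) (by omega)]
            | some q0 =>
              obtain rfl := pvPropagate_eq_some hp0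
              cases hp1 : pvPropagate switches_a (PySem.List.pySetD pos idx 1) idx with
              | none =>
                simp only
                rw [IH _ (idx + 1) f2 (by omega) (by omega)]
              | some q1 =>
                obtain rfl := pvPropagate_eq_some hp1
                simp only
                rw [IH _ (idx + 1) f2 (by omega) (by omega),
                    IH (PySem.List.pySetD pos idx 1) (idx + 1) f2 (by omega) (by omega)]
          · simp only [ne_eq, hv2, not_false_eq_true, if_true]
            exact IH pos (idx + 1) f2 (by omega) (by omega)

-- the stack loop computes the same value under any fuel that covers its step count
theorem pvStackGo_congr (switches_a : List (List Int)) (m : Int) :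
    ∀ (w : Nat) (st : List (List Int × Int)) (f1 f2 : Nat),
      pvWsum m st = w → pvGoodSt m st → pvWsum m st ≤ f1 → pvWsum m st ≤ f2 →
      pvStackGo switches_a m f1 st = pvStackGo switches_a m f2 st := by
  intro w
  induction w using Nat.strong_induction_on with
  | _ w IH =>
  intro st f1 f2 hw hgood h1 h2
  match st with
  | [] => simp [pvStackGo]
  | (cur, i) :: rest =>
    obtain ⟨hlen, hlb, hub⟩ := hgood (cur, i) (by simp)
    have hrgood : pvGoodSt m rest := fun f hf => hgood f (by simp [hf])
    have hWc := pvWsum_cons m cur i rest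
    have hWp := pvW_pos m i
    cases f1 with
  | zero => omega
  | succ f1 =>
  cases f2 with
  | zero => omega
  | succ f2 =>
      simp only [pvStackGo]
      by_cases him : i = m - 1
      · simp only [if_pos him]
        cases hP : (pvPropagate switches_a cur (m - 1)).isSome
        · simp only [hP, Bool.false_eq_true, if_false]
          exact IH (pvWsum m rest) (by omega) rest f1 f2 rfl hrgood (by omega) (by omega)
        · simp [hP]
      · have hlt : i < m - 1 := by omega
        simp only [if_neg him]
        cases hv : PySem.List.pyGet? cur i with
        | none => rfl
        | some v =>
          by_cases hv2 : v = 2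
          · simp only [hv2, ne_eq, not_true_eq_false, if_false]
            have hb0 := pvPushFrame_wsum_le switches_a cur i 0 m
            have hb1 := pvPushFrame_wsum_le switches_a cur i 1 m
            have htr := pvW_triple hlt
            have hA := pvWsum_append m (pvPushFrame switches_a cur i 0)
              (pvPushFrame switches_a cur i 1 ++ rest)
            have hA2 := pvWsum_append m (pvPushFrame switches_a cur i 1) rest
            have hg : pvGoodSt m (pvPushFrame switches_a cur i 0 ++
                (pvPushFrame switches_a cur i 1 ++ rest)) := by
              intro f hf
              rcases List.mem_append.1 hf with h' | h'
              · exact pvPushFrame_good 0 m hlen hlb hlt f h'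
              · rcases List.mem_append.1 h' with h'' | h''
                · exact pvPushFrame_good 1 m hlen hlb hlt f h''
                · exact hrgood f h''
            exact IH (pvWsum m (pvPushFrame switches_a cur i 0 ++
                (pvPushFrame switches_a cur i 1 ++ rest))) (by omega) _ f1 f2 rfl hg
              (by omega) (by omega)
          · simp only [ne_eq, hv2, not_false_eq_true, if_true]
            have hs := pvW_succ_lt hlt
            have hWc' := pvWsum_cons m cur (i + 1) rest
            have hg : pvGoodSt m ((cur, i + 1) :: rest) := by
              intro f hf
              rcases List.mem_cons.1 hf with rfl | h'
              · exact ⟨hlen, by omega, by omega⟩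
              · exact hrgood f h'
            exact IH (pvWsum m ((cur, i + 1) :: rest)) (by omega) _ f1 f2 rfl hg
              (by omega) (by omega)

-- Key bridge: processing a well-formed frame on top of the stack is the recursive
-- search of that frame, followed by the rest of the stack.
theorem pvBridge (switches_a : List (List Int)) (m : Int) :
    ∀ (k : Nat) (cur : List Int) (i : Int) (rest : List (List Int × Int)) (fuel : Nat),
      (cur.length : Int) = m → -m ≤ i → i ≤ m - 1 → pvGoodSt m rest →
      (m - 1 - i).toNat = k → pvWsum m ((cur, i) :: rest) ≤ fuel →
      pvStackGo switches_a m fuel ((cur, i) :: rest)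
        = (dfs switches_a cur i || pvStackGo switches_a m (pvWsum m rest) rest) := by
  intro k
  induction k using Nat.strong_induction_on with
  | _ k IH =>
  intro cur i rest fuel hlen hlb hub hrgood hk hfuel
  have hm1 : (1 : Int) ≤ m := by omega
  have hWc := pvWsum_cons m cur i rest
  have hWp := pvW_pos m i
  cases fuel with
  | zero => omega
  | succ fuel =>
  by_cases him : i = m - 1
  · rw [dfs]
    simp only [dfsGo, pvStackGo, hlen, if_pos him]
    cases hP : (pvPropagate switches_a cur (m - 1)).isSome
    · have hc := pvStackGo_congr switches_a m (pvWsum m rest) rest fuel (pvWsum m rest) rfl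
        hrgood (by omega) (le_refl _)
      simp [hP, hc]
    · simp [hP]
  · have hlt : i < m - 1 := by omega
    have hin : PySem.Raise.InRange cur.length i := ⟨by omega, by omega⟩
    have hsome : (PySem.List.pyGet? cur i).isSome := by
      cases hv : PySem.List.pyGet? cur i with
      | none => exact absurd ((PySem.List.pyGet?_eq_none_iff cur i).1 hv) (by simp [hin])
      | some v => rfl
    obtain ⟨v, hv⟩ := Option.isSome_iff_exists.1 hsome
    have hws := pvW_succ_lt hlt
    rw [dfs]
    simp only [dfsGo, pvStackGo, hlen, if_neg him, hv]
    by_cases hv2 : v = 2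
    · simp only [hv2, ne_eq, not_true_eq_false, if_false]
      have hg0 := PySem.List.length_pySetD cur i (0 : Int)
      have hg1 := PySem.List.length_pySetD cur i (1 : Int)
      have hne0 : PySem.List.pySetD cur i (0 : Int) ≠ [] := by
        intro hc
        rw [hc] at hg0
        simp at hg0
        omega
      have hne1 : PySem.List.pySetD cur i (1 : Int) ≠ [] := by
        intro hc
        rw [hc] at hg1
        simp at hg1
        omega
      have htr := pvW_triple hlt
      have hWi := pvW_pos m (i + 1)
      have hIH : ∀ (q : List Int) (rs : List (List Int × Int)) (f : Nat),
          (q.length : Int) = m → pvGoodSt m rs → pvWsum m ((q, i + 1) :: rs) ≤ f →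
          pvStackGo switches_a m f ((q, i + 1) :: rs)
            = (dfs switches_a q (i + 1) || pvStackGo switches_a m (pvWsum m rs) rs) :=
        fun q rs f hq hrs hf =>
          IH ((m - 1 - (i + 1)).toNat) (by omega) q (i + 1) rs f hq (by omega) (by omega) hrs rfl hf
      have hdf0 : dfsGo switches_a (PySem.List.pySetD cur i 0) (i + 1) ((m - i).toNat)
          = dfs switches_a (PySem.List.pySetD cur i 0) (i + 1) := by
        rw [dfs]
        exact pvDfsGo_congr switches_a _ _ (i + 1) _ (by omega) (by omega)
      have hdf1 : dfsGo switches_a (PySem.List.pySetD cur i 1) (i + 1) ((m - i).toNat)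
          = dfs switches_a (PySem.List.pySetD cur i 1) (i + 1) := by
        rw [dfs]
        exact pvDfsGo_congr switches_a _ _ (i + 1) _ (by omega) (by omega)
      have hgp0 := pvPushFrame_good (switches_a := switches_a) 0 m hlen hlb hlt
      have hgp1 := pvPushFrame_good (switches_a := switches_a) 1 m hlen hlb hlt
      unfold pvPushFrame
      unfold pvPushFrame at hgp0 hgp1
      cases hp0 : pvPropagate switches_a (PySem.List.pySetD cur i 0) i with
      | none =>
        cases hp1 : pvPropagate switches_a (PySem.List.pySetD cur i 1) i with
        | none =>
          have hc := pvStackGo_congr switches_a m (pvWsum m rest) rest fuel (pvWsum m rest) rfl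
            hrgood (by omega) (le_refl _)
          simp [hc]
        | some q1 =>
          obtain rfl := pvPropagate_eq_some hp1
          rw [hp1] at hgp1
          have hW1 := pvWsum_cons m (PySem.List.pySetD cur i 1) (i + 1) rest
          simp only [ne_eq, hne1, not_false_eq_true, if_true, List.nil_append,
            List.singleton_append, Bool.false_or]
          rw [hIH _ rest fuel (by rw [hg1, hlen]) hrgood (by omega), hdf1]
          simp
      | some q0 =>
        obtain rfl := pvPropagate_eq_some hp0
        rw [hp0] at hgp0
        have hW0 := pvWsum_cons m (PySem.List.pySetD cur i 0) (i + 1) rest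
        cases hp1 : pvPropagate switches_a (PySem.List.pySetD cur i 1) i with
        | none =>
          simp only [ne_eq, hne0, not_false_eq_true, if_true, List.nil_append,
            List.append_nil, List.singleton_append, Bool.or_false]
          rw [hIH _ rest fuel (by rw [hg0, hlen]) hrgood (by omega), hdf0]
          simp
        | some q1 =>
          obtain rfl := pvPropagate_eq_some hp1
          rw [hp1] at hgp1
          have hW1 := pvWsum_cons m (PySem.List.pySetD cur i 1) (i + 1) rest
          have hW01 := pvWsum_cons m (PySem.List.pySetD cur i 0) (i + 1)
            ((PySem.List.pySetD cur i 1, i + 1) :: rest)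
          have hg1r : pvGoodSt m ((PySem.List.pySetD cur i 1, i + 1) :: rest) := by
            intro f hf
            rcases List.mem_cons.1 hf with rfl | h'
            · exact hgp1 _ (by simp [hne1])
            · exact hrgood f h'
          simp only [ne_eq, hne0, hne1, not_false_eq_true, if_true, List.singleton_append,
            List.cons_append, List.nil_append]
          rw [hIH _ ((PySem.List.pySetD cur i 1, i + 1) :: rest) fuel (by rw [hg0, hlen]) hg1r
                (by omega),
              hIH _ rest (pvWsum m ((PySem.List.pySetD cur i 1, i + 1) :: rest))
                (by rw [hg1, hlen]) hrgood (le_refl _),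
              hdf0, hdf1, Bool.or_assoc]
          simp
    · simp only [ne_eq, hv2, not_false_eq_true, if_true]
      have hW' := pvWsum_cons m cur (i + 1) rest
      rw [IH ((m - 1 - (i + 1)).toNat) (by omega) cur (i + 1) rest fuel hlen (by omega) (by omega)
            hrgood rfl (by omega)]
      have hdf : dfsGo switches_a cur (i + 1) ((m - i).toNat) = dfs switches_a cur (i + 1) := by
        rw [dfs]
        exact pvDfsGo_congr switches_a _ _ (i + 1) _ (by omega) (by omega)
      rw [hdf]

theorem dfs_spec : Claim_equal_dfs := by
  intro switches_a pos idx hdom hpre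
  obtain ⟨⟨h1, h2⟩, hrows⟩ := hpre
  unfold Spec_dfs dfs_alt
  rw [pvBridge switches_a (pos.length : Int) ((↑pos.length - 1 - idx).toNat) pos idx []
        (pvWsum (pos.length : Int) [(pos, idx)]) rfl (by omega) (by omega)
        (by intro f hf; simp at hf) rfl (le_refl _)]
  simp [pvStackGo, pvWsum]
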